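-- pv_equiv track=rewrite | github.com/boyuanzheng010/multi_coref | tbbt/util.py | find_all_continuous_subsets
-- ===== SOURCE A (Python) =====
-- def find_all_continuous_subsets(idx_list, gaps, len_threshold, gap_threshold):
--     res = []
--     path = [idx_list[0]]
--     for i in range(len(gaps)):
--         if gaps[i]<=gap_threshold:
--             path.append(idx_list[i+1])
--         else:
--             if len(path)>=len_threshold:
--                 res.append(path)
--             path = [idx_list[i+1]]
--     return res
-- ===== SOURCE B (Python) =====
-- def find_all_continuous_subsets(idx_list, gaps, len_threshold, gap_threshold):
--     # Recursive decomposition: consume gaps and the tail of idx_list together,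
--     # carrying the current run; a large gap closes the run (kept if long
--     # enough) and emits it in front of the recursively built rest.
--     def go(cur, rest_idx, rest_gaps):
--         if not rest_gaps:
--             return []
--         g, gs = rest_gaps[0], rest_gaps[1:]
--         x, xs = rest_idx[0], rest_idx[1:]
--         if g <= gap_threshold:
--             return go(cur + [x], xs, gs)
--         tail = go([x], xs, gs)
--         return ([cur] + tail) if len(cur) >= len_threshold else tail
--     return go([idx_list[0]], idx_list[1:], gaps)
-- ===== Notes on version B (the rewrite author's own statement) =====
-- stated objective: alternative
-- what changed: B is a recursion that consumes gaps and the tail of idx_list simultaneously, carrying the current run and building the result list front-to-back from recursive calls, instead of A's index loop mutating res/path; Pre_ excludes inputs where A raises IndexError (len(idx_list) < len(gaps)+1, including empty idx_list).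
import Mathlib
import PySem

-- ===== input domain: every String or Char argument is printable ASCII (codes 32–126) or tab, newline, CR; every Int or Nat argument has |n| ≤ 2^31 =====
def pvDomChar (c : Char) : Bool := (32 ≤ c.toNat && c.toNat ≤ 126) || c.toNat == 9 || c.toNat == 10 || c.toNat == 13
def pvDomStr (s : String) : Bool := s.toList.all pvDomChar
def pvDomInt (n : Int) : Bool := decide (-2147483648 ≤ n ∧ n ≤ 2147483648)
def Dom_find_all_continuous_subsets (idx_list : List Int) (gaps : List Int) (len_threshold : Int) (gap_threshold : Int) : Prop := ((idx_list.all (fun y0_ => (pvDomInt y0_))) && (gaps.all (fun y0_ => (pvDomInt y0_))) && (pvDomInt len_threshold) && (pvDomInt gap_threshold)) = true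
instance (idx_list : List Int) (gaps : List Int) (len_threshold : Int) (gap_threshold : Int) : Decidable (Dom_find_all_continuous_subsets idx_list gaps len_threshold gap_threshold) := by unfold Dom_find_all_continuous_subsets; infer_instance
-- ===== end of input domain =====

-- B replaces A's index loop mutating res/path by a recursion that consumes the
-- gap list and the tail of idx_list together (objective: alternative
-- decomposition, same cost).

-- ===== PORT A =====
-- loop body of A's for-loop: state = (res, path); out-of-range reads cannot
-- occur inside Pre_ (pyGetD's default is never read there)
def pvStepA (idx_list gaps : List Int) (len_threshold gap_threshold : Int)
    (st : List (List Int) × List Int) (i : Nat) : List (List Int) × List Int :=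
  if PySem.List.pyGetD gaps (Int.ofNat i) 0 ≤ gap_threshold then
    (st.1, st.2 ++ [PySem.List.pyGetD idx_list (Int.ofNat i + 1) 0])
  else
    ((if (st.2.length : Int) ≥ len_threshold then st.1 ++ [st.2] else st.1),
     [PySem.List.pyGetD idx_list (Int.ofNat i + 1) 0])

def find_all_continuous_subsets (idx_list : List Int) (gaps : List Int) (len_threshold : Int) (gap_threshold : Int) : List (List Int) :=
  ((List.range gaps.length).foldl (pvStepA idx_list gaps len_threshold gap_threshold)
    ([], [PySem.List.pyGetD idx_list 0 0])).1

-- ===== PORT B =====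
-- B's inner recursion `go(cur, rest_idx, rest_gaps)`; the `[]` branch for
-- rest_idx is unreachable inside Pre_ (Python raises IndexError there)
def pvGoB (len_threshold gap_threshold : Int) :
    List Int → List Int → List Int → List (List Int)
  | _, _, [] => []
  | _, [], _ :: _ => []
  | cur, x :: xs, g :: gs =>
    if g ≤ gap_threshold then
      pvGoB len_threshold gap_threshold (cur ++ [x]) xs gs
    else
      let tail := pvGoB len_threshold gap_threshold [x] xs gs
      if (cur.length : Int) ≥ len_threshold then [cur] ++ tail else tail

def find_all_continuous_subsets_alt (idx_list : List Int) (gaps : List Int) (len_threshold : Int) (gap_threshold : Int) : List (List Int) :=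
  pvGoB len_threshold gap_threshold [PySem.List.pyGetD idx_list 0 0] (idx_list.drop 1) gaps

-- ===== PRECONDITION & SPEC =====
-- A reads idx_list[0] and idx_list[i+1] for every i < len(gaps); it raises
-- IndexError exactly when len(idx_list) < len(gaps) + 1. Pre_ excludes exactly
-- those crashing inputs.
def Pre_find_all_continuous_subsets (idx_list : List Int) (gaps : List Int) (len_threshold : Int) (gap_threshold : Int) : Prop :=
  gaps.length < idx_list.length
instance (idx_list : List Int) (gaps : List Int) (len_threshold : Int) (gap_threshold : Int) : Decidable (Pre_find_all_continuous_subsets idx_list gaps len_threshold gap_threshold) := by unfold Pre_find_all_continuous_subsets; infer_instance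

def pvWitness_find_all_continuous_subsets : List Int × List Int × Int × Int := ([1, 2, 5], [1, 3], 1, 2)

def Spec_find_all_continuous_subsets (idx_list : List Int) (gaps : List Int) (len_threshold : Int) (gap_threshold : Int) (out : List (List Int)) : Prop := out = find_all_continuous_subsets_alt idx_list gaps len_threshold gap_threshold
instance (idx_list : List Int) (gaps : List Int) (len_threshold : Int) (gap_threshold : Int) (out : List (List Int)) : Decidable (Spec_find_all_continuous_subsets idx_list gaps len_threshold gap_threshold out) := by unfold Spec_find_all_continuous_subsets; infer_instance

-- ===== CLAIM (what is proved, stated in full; the proofs are below) =====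
def Claim_equal_find_all_continuous_subsets : Prop := ∀ (idx_list : List Int) (gaps : List Int) (len_threshold : Int) (gap_threshold : Int), Dom_find_all_continuous_subsets idx_list gaps len_threshold gap_threshold → Pre_find_all_continuous_subsets idx_list gaps len_threshold gap_threshold → Spec_find_all_continuous_subsets idx_list gaps len_threshold gap_threshold (find_all_continuous_subsets idx_list gaps len_threshold gap_threshold)

-- ===== LEMMAS AND PROOFS =====

-- Relating A's fold over the index range [k, gaps.length) with accumulator
-- (res, cur) to B's recursion on the gap suffix gs = gaps.drop k, with the
-- idx-list suffix idx_list.drop (k+1).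
lemma pv_fold_eq_go (idx_list gaps : List Int) (lt gt : Int)
    (hpre : gaps.length < idx_list.length) :
    ∀ (gs : List Int) (k : Nat), gaps.drop k = gs → k + gs.length = gaps.length →
      ∀ (res : List (List Int)) (cur : List Int),
      ((List.range' k gs.length).foldl (pvStepA idx_list gaps lt gt) (res, cur)).1
        = res ++ pvGoB lt gt cur (idx_list.drop (k + 1)) gs := by
  intro gs
  induction gs with
  | nil => intro k _ _ res cur; simp [pvGoB]
  | cons g gs' ih =>
    intro k hdrop hlen res cur
    have hlen' : k + gs'.length + 1 = gaps.length := by simpa [Nat.add_comm, Nat.add_assoc] using hlen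
    have hk : k < gaps.length := by omega
    have hk1 : k + 1 < idx_list.length := by omega
    have hg : gaps[k] = g := by
      have h0 : (gaps.drop k)[0]'(by simp [hdrop]) = g := by simp [hdrop]
      simpa using h0
    have hgapk : PySem.List.pyGetD gaps (Int.ofNat k) 0 = g := by
      rw [show (Int.ofNat k) = ((k : Nat) : Int) from rfl, PySem.List.pyGetD_natCast,
        List.getD_eq_getElem gaps 0 hk, hg]
    have hidx : PySem.List.pyGetD idx_list (Int.ofNat k + 1) 0 = idx_list[k + 1] := by
      rw [show (Int.ofNat k + 1) = ((k + 1 : Nat) : Int) from rfl, PySem.List.pyGetD_natCast,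
        List.getD_eq_getElem idx_list 0 hk1]
    have hdrop1 : idx_list.drop (k + 1) = idx_list[k + 1] :: idx_list.drop (k + 2) :=
      List.drop_eq_getElem_cons hk1
    have hdrop' : gaps.drop (k + 1) = gs' := by
      have : (gaps.drop k).drop 1 = gs'.drop 0 := by rw [hdrop]; simp
      simpa [List.drop_drop, Nat.add_comm] using this
    simp only [List.length_cons]
    rw [List.range'_succ, List.foldl_cons]
    rw [hdrop1, pvGoB]
    by_cases h : g ≤ gt
    · have h2 : k + 1 + 1 = k + 2 := by omega
      have hA := ih (k + 1) hdrop' (by omega) res (cur ++ [idx_list[k + 1]])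
      rw [h2] at hA
      simp only [pvStepA, hgapk, hidx, if_pos h]
      exact hA
    · have h2 : k + 1 + 1 = k + 2 := by omega
      have hA := ih (k + 1) hdrop' (by omega)
        (if (cur.length : Int) ≥ lt then res ++ [cur] else res) [idx_list[k + 1]]
      rw [h2] at hA
      simp only [pvStepA, hgapk, hidx, if_neg h]
      rw [hA]
      by_cases hl : (cur.length : Int) ≥ lt
      · simp [hl]
      · simp [hl]

lemma pv_final (idx_list gaps : List Int) (lt gt : Int)
    (hpre : gaps.length < idx_list.length) :
    find_all_continuous_subsets idx_list gaps lt gt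
      = find_all_continuous_subsets_alt idx_list gaps lt gt := by
  unfold find_all_continuous_subsets find_all_continuous_subsets_alt
  have := pv_fold_eq_go idx_list gaps lt gt hpre gaps 0 rfl (by omega)
    [] [PySem.List.pyGetD idx_list 0 0]
  simpa [List.range_eq_range'] using this

-- ===== VERDICT (by name: the statement is the Claim_ definition above) =====
theorem find_all_continuous_subsets_spec : Claim_equal_find_all_continuous_subsets := by
  intro idx_list gaps lt gt _ hpre
  unfold Spec_find_all_continuous_subsets
  exact pv_final idx_list gaps lt gt hpre
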